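-- pv_equiv track=rewrite | github.com/windorchidwarm/py_test_project | hugh/onon/ttwa/num_combination.py | combination_weight_nums
-- ===== SOURCE A (Python) =====
-- def combination_weight_nums(weights, nums):
--     '''
--     现有一组砝码，重量互不相等，分别为m1,m2,m3…mn；
--     每种砝码对应的数量为x1,x2,x3...xn。现在要用这些砝码去称物体的重量(放在同一侧)，问能称出多少种不同的重量。
--     注：
--     称重重量包括0
--     :param weights:
--     :param nums:
--     :return:
--     '''
--     max_weight = 0
--     for i in range(len(weights)):
--         max_weight += weights[i] * nums[i]
--
--     h_comb = [0 for i in range(max_weight + 1)]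
--     h_comb[0] = 1
--
--     for i in range(len(weights)):
--         for j in range(max_weight, -1, -1):
--             if h_comb[j] == 1:
--                 for k in range(nums[i]):
--                     h_comb[j + (k + 1) * weights[i]] = 1
--     count = 0
--     for i in range(len(h_comb)):
--         if h_comb[i] == 1:
--             count += 1
--     return count
-- ===== SOURCE B (Python) =====
-- def combination_weight_nums(weights, nums):
--     mask = 1
--     for w, n in zip(weights, nums):
--         for _ in range(n):
--             mask |= mask << w
--     return mask.bit_count()
-- ===== Notes on version B (the rewrite author's own statement) =====
-- stated objective: alternative
-- what changed: Replaces the 0/1 marking array with its backward index loops and final counting scan by a big-integer bitset of reachable sums updated with shift-or per available copy of each weight, returning its popcount.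
-- outside the precondition, e.g. on combination_weight_nums([-1, -3, 4], [2, -3, -1, -3]): A returns 3, B raises ValueError; on combination_weight_nums([0, 1], [-1, 1]): A returns 2, B returns 2
import Mathlib
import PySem

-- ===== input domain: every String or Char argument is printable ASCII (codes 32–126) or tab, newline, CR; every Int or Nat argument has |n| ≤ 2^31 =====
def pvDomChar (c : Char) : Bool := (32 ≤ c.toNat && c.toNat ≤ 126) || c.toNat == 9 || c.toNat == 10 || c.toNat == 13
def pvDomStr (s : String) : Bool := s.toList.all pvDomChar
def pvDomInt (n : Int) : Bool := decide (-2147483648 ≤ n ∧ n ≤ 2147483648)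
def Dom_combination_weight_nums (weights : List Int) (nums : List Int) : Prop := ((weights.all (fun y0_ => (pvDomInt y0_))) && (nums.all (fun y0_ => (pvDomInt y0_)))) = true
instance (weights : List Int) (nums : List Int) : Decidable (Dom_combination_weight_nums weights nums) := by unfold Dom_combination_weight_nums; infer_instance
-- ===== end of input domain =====

-- B replaces A's backward in-place 0/1 marking array and counting scan by a big-integer
-- bitset of reachable sums updated with shift-or, returning its popcount (alternative algorithm).


-- ===== PORT A =====
def combination_weight_nums (weights : List Int) (nums : List Int) : Int :=
  let max_weight : Int :=
    (PySem.List.pyRange 0 weights.length 1).foldl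
      (fun acc i => acc + PySem.List.pyGetD weights i 0 * PySem.List.pyGetD nums i 0) 0
  let h0 : List Int :=
    PySem.List.pySetD ((PySem.List.pyRange 0 (max_weight + 1) 1).map (fun _ => (0 : Int))) 0 1
  let h : List Int :=
    (PySem.List.pyRange 0 weights.length 1).foldl (fun h i =>
      (PySem.List.pyRange max_weight (-1) (-1)).foldl (fun h j =>
        if PySem.List.pyGetD h j 0 == 1 then
          (PySem.List.pyRange 0 (PySem.List.pyGetD nums i 0) 1).foldl (fun h k =>
            PySem.List.pySetD h (j + (k + 1) * PySem.List.pyGetD weights i 0) 1) h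
        else h) h) h0
  (PySem.List.pyRange 0 h.length 1).foldl (fun c i =>
    if PySem.List.pyGetD h i 0 == 1 then c + 1 else c) 0

-- ===== PORT B =====
def combination_weight_nums_alt (weights : List Int) (nums : List Int) : Int :=
  let mask : Int :=
    (weights.zip nums).foldl
      (fun mask p => (PySem.List.pyRange 0 p.2 1).foldl
        (fun mask _ => PySem.Int.bor mask (mask <<< p.1.toNat)) mask)
      1
  ((PySem.Int.bitCount mask : Nat) : Int)

-- ===== PRECONDITION & SPEC =====
-- Pre_ excludes inputs where A raises (nums shorter than weights: IndexError; a negative total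
-- makes h_comb empty so h_comb[0]=1 raises; negative weights/nums almost always store out of
-- range: IndexError) and the few negative-weight/negative-num inputs where A still returns a
-- value that is an accident of Python's negative-index wraparound and empty ranges.
def Pre_combination_weight_nums (weights : List Int) (nums : List Int) : Prop :=
  weights.length ≤ nums.length ∧ (∀ w ∈ weights, 0 ≤ w) ∧
    (∀ n ∈ nums.take weights.length, 0 ≤ n)
instance (weights : List Int) (nums : List Int) : Decidable (Pre_combination_weight_nums weights nums) := by
  unfold Pre_combination_weight_nums; infer_instance

def pvWitness_combination_weight_nums : List Int × List Int := ([1, 2], [2, 1])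

def Spec_combination_weight_nums (weights : List Int) (nums : List Int) (out : Int) : Prop := out = combination_weight_nums_alt weights nums
instance (weights : List Int) (nums : List Int) (out : Int) : Decidable (Spec_combination_weight_nums weights nums out) := by unfold Spec_combination_weight_nums; infer_instance

-- ===== CLAIM (what is proved, stated in full; the proofs are below) =====
def Claim_equal_combination_weight_nums : Prop := ∀ (weights : List Int) (nums : List Int), Dom_combination_weight_nums weights nums → Pre_combination_weight_nums weights nums → Spec_combination_weight_nums weights nums (combination_weight_nums weights nums)

-- ===== LEMMAS AND PROOFS =====

theorem pv_foldl_idx_zip {α : Type} (f : α → Int → Int → α) (ws ns : List Int) (init : α)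
    (hlen : ws.length ≤ ns.length) :
    (PySem.List.pyRange 0 ws.length 1).foldl
      (fun a i => f a (PySem.List.pyGetD ws i 0) (PySem.List.pyGetD ns i 0)) init
    = (ws.zip ns).foldl (fun a p => f a p.1 p.2) init := by
  have key : ∀ m : Nat, m ≤ ws.length →
      (PySem.List.pyRange 0 (m : Int) 1).foldl
        (fun a i => f a (PySem.List.pyGetD ws i 0) (PySem.List.pyGetD ns i 0)) init
      = ((ws.zip ns).take m).foldl (fun a p => f a p.1 p.2) init := by
    intro m
    induction m with
    | zero => intro _; simp
    | succ m ih =>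
      intro hm
      have hm' : m ≤ ws.length := by omega
      have hmz : m < (ws.zip ns).length := by simp [List.length_zip]; omega
      have h1 : ((m : Int) + 1) = ((m + 1 : Nat) : Int) := by push_cast; ring
      rw [← h1, PySem.List.pyRange_one_succ_right (by positivity), List.foldl_append,
        List.take_add_one, List.getElem?_eq_getElem hmz, ih hm']
      simp [List.foldl_append, List.getElem_zip,
        PySem.List.pyGetD_natCast, List.getD_eq_getElem?_getD,
        List.getElem?_eq_getElem (by omega : m < ws.length),
        List.getElem?_eq_getElem (by omega : m < ns.length)]
  have := key ws.length le_rfl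
  rw [this, List.take_of_length_le (by simp [List.length_zip])]

theorem pv_descRange_nil : PySem.List.pyRange (-1) (-1) (-1) = [] := by decide

theorem pv_descRange_cons (a : Int) (ha : 0 ≤ a) :
    PySem.List.pyRange a (-1) (-1) = a :: PySem.List.pyRange (a - 1) (-1) (-1) := by
  simp only [PySem.List.pyRange]
  norm_num
  rcases eq_or_lt_of_le ha with h0 | hpos
  · rw [← h0]; norm_num
  · rw [if_pos hpos, if_pos (by omega : (-1:Int) < a),
      (by omega : (a + 1).toNat = a.toNat + 1),
      List.range_succ_eq_map, List.map_cons, List.map_map]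
    refine List.cons_eq_cons.mpr ⟨by norm_num, ?_⟩
    apply List.map_congr_left
    intro k _
    simp [Function.comp]
    ring

theorem pv_kloop (w j : Int) (n : Nat) (h : List Int) (hj : 0 ≤ j) (hw : 0 ≤ w)
    (hin : ∀ k : Nat, k < n → j + ((k : Int) + 1) * w < h.length) :
    ((PySem.List.pyRange 0 (n : Int) 1).foldl
        (fun h k => PySem.List.pySetD h (j + (k + 1) * w) 1) h).length = h.length ∧
    ∀ t : Int, 0 ≤ t → t < (h.length : Int) →
      PySem.List.pyGetD
        ((PySem.List.pyRange 0 (n : Int) 1).foldl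
          (fun h k => PySem.List.pySetD h (j + (k + 1) * w) 1) h) t 0
      = if t ∈ (List.range n).map (fun k => j + ((k : Int) + 1) * w) then 1
        else PySem.List.pyGetD h t 0 := by
  induction n with
  | zero => simp
  | succ n ih =>
    have hin' : ∀ k : Nat, k < n → j + ((k : Int) + 1) * w < h.length := fun k hk => hin k (by omega)
    obtain ⟨ihlen, ihval⟩ := ih hin'
    have hcast : ((n + 1 : Nat) : Int) = (n : Int) + 1 := by push_cast; ring
    rw [hcast, PySem.List.pyRange_one_succ_right (by positivity), List.foldl_append]
    set h1 := (PySem.List.pyRange 0 (n : Int) 1).foldl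
        (fun h k => PySem.List.pySetD h (j + (k + 1) * w) 1) h with hh1
    simp only [List.foldl_cons, List.foldl_nil]
    have hposn : j + ((n : Int) + 1) * w < h1.length := by rw [ihlen]; exact_mod_cast hin n (by omega)
    have hpos0 : 0 ≤ j + ((n : Int) + 1) * w := by positivity
    have hlen2 : (PySem.List.pySetD h1 (j + ((n : Int) + 1) * w) 1).length = h1.length :=
      PySem.List.length_pySetD _ _ _
    refine ⟨by rw [hlen2, ihlen], ?_⟩
    intro t ht0 htL
    have hpnat : j + ((n : Int) + 1) * w = ((j + ((n : Int) + 1) * w).toNat : Int) := by omega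
    have htnat : t = ((t.toNat : Nat) : Int) := by omega
    rw [hpnat, htnat, PySem.List.pyGetD_pySetD_natCast h1 _ _ 1 0 (by omega), ← htnat,
      ihval t ht0 htL]
    have hmem : ∀ m : Nat, (t ∈ (List.range m).map (fun k => j + ((k : Int) + 1) * w))
        ↔ ∃ k : Nat, k < m ∧ t = j + ((k : Int) + 1) * w := by
      intro m; simp [eq_comm]
    by_cases he : t.toNat = (j + ((n : Int) + 1) * w).toNat
    · have : t = j + ((n : Int) + 1) * w := by omega
      rw [if_pos he, if_pos ((hmem (n+1)).mpr ⟨n, by omega, this⟩)]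
    · have hne : t ≠ j + ((n : Int) + 1) * w := by omega
      rw [if_neg he]
      by_cases hm : t ∈ (List.range n).map (fun k => j + ((k : Int) + 1) * w)
      · obtain ⟨k, hk, hkt⟩ := (hmem n).mp hm
        rw [if_pos hm, if_pos ((hmem (n+1)).mpr ⟨k, by omega, hkt⟩)]
      · rw [if_neg hm, if_neg ?_]
        intro hc
        obtain ⟨k, hk, hkt⟩ := (hmem (n+1)).mp hc
        rcases Nat.lt_succ_iff_lt_or_eq.mp hk with hk' | hk'
        · exact hm ((hmem n).mpr ⟨k, hk', hkt⟩)
        · subst hk'; exact hne hkt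

def pvMarks (S : List Int) (w : Int) (n : Nat) (j : Int) : List Int :=
  (S.filter (fun s => decide (j < s))).flatMap
    (fun s => (List.range n).map (fun k => s + ((k : Int) + 1) * w))

theorem pv_mem_mapRange (t w b : Int) (n : Nat) :
    t ∈ (List.range n).map (fun k => b + ((k : Int) + 1) * w) ↔
      ∃ k : Nat, k < n ∧ t = b + ((k : Int) + 1) * w := by
  simp [eq_comm]

theorem pv_mem_marks (S : List Int) (w : Int) (n : Nat) (j t : Int) :
    t ∈ pvMarks S w n j ↔ ∃ s ∈ S, j < s ∧ ∃ k : Nat, k < n ∧ t = s + ((k : Int) + 1) * w := by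
  simp [pvMarks, eq_comm, and_assoc]

theorem pv_jloop (S : List Int) (w : Int) (n : Nat) (L : Nat) (hw : 0 ≤ w)
    (hS : ∀ s ∈ S, 0 ≤ s ∧ s + (n : Int) * w < (L : Int)) :
    ∀ (jn : Nat) (h : List Int), jn ≤ L → h.length = L →
    (∀ t : Int, 0 ≤ t → t < (L : Int) →
      PySem.List.pyGetD h t 0 = if t ∈ S ++ pvMarks S w n ((jn : Int) - 1) then 1 else 0) →
    ((PySem.List.pyRange ((jn : Int) - 1) (-1) (-1)).foldl
        (fun h j => if PySem.List.pyGetD h j 0 == 1 then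
          (PySem.List.pyRange 0 (n : Int) 1).foldl
            (fun h k => PySem.List.pySetD h (j + (k + 1) * w) 1) h
        else h) h).length = L ∧
    ∀ t : Int, 0 ≤ t → t < (L : Int) →
      PySem.List.pyGetD
        ((PySem.List.pyRange ((jn : Int) - 1) (-1) (-1)).foldl
          (fun h j => if PySem.List.pyGetD h j 0 == 1 then
            (PySem.List.pyRange 0 (n : Int) 1).foldl
              (fun h k => PySem.List.pySetD h (j + (k + 1) * w) 1) h
          else h) h) t 0
      = if t ∈ S ++ pvMarks S w n (-1) then 1 else 0 := by
  intro jn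
  induction jn with
  | zero =>
    intro h hle hlen hinv
    have e : ((0 : Nat) : Int) - 1 = -1 := by norm_num
    rw [e] at hinv ⊢
    rw [pv_descRange_nil]
    exact ⟨hlen, hinv⟩
  | succ jn ih =>
    intro h hle hlen hinv
    have e : ((jn + 1 : Nat) : Int) - 1 = (jn : Int) := by push_cast; ring
    rw [e] at hinv ⊢
    rw [pv_descRange_cons (jn : Int) (by positivity), List.foldl_cons]
    -- jn is not a mark position of pvMarks … jn
    have hnotmark : ((jn : Int) ∉ pvMarks S w n (jn : Int)) := by
      rw [pv_mem_marks]
      rintro ⟨s, hsS, hjs, k, hk, hts⟩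
      nlinarith [hts, hjs]
    have hinvjn := hinv (jn : Int) (by positivity) (by exact_mod_cast hle)
    by_cases hmem : ((jn : Int) ∈ S)
    · -- the cell is 1: the k-loop fires
      have hc : PySem.List.pyGetD h (jn : Int) 0 = 1 := by
        rw [hinvjn, if_pos (List.mem_append_left _ hmem)]
      rw [hc]
      simp only [BEq.rfl, if_pos]
      have hin : ∀ k : Nat, k < n → (jn : Int) + ((k : Int) + 1) * w < h.length := by
        intro k hk
        have h1 := (hS _ hmem).2
        have h2 : ((k : Int) + 1) * w ≤ (n : Int) * w := by
          apply mul_le_mul_of_nonneg_right _ hw; exact_mod_cast hk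
        rw [hlen]; omega
      obtain ⟨klen, kval⟩ := pv_kloop w (jn : Int) n h (by positivity) hw hin
      set h2 := (PySem.List.pyRange 0 (n : Int) 1).foldl
          (fun h k => PySem.List.pySetD h ((jn : Int) + (k + 1) * w) 1) h with hh2
      have hlen2 : h2.length = L := by rw [klen, hlen]
      have hinv2 : ∀ t : Int, 0 ≤ t → t < (L : Int) →
          PySem.List.pyGetD h2 t 0 = if t ∈ S ++ pvMarks S w n ((jn : Int) - 1) then 1 else 0 := by
        intro t ht0 htL
        rw [kval t ht0 (by rw [hlen]; exact htL), hinv t ht0 htL]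
        by_cases hA : t ∈ (List.range n).map (fun k => (jn : Int) + ((k : Int) + 1) * w)
        · rw [if_pos hA, if_pos ?_]
          obtain ⟨k, hk, hkt⟩ := (pv_mem_mapRange _ _ _ _).mp hA
          exact List.mem_append_right _ ((pv_mem_marks _ _ _ _ _).mpr ⟨(jn : Int), hmem, by omega, k, hk, hkt⟩)
        · rw [if_neg hA]
          by_cases hB : t ∈ S ++ pvMarks S w n (jn : Int)
          · rw [if_pos hB, if_pos ?_]
            rcases List.mem_append.mp hB with hB | hB
            · exact List.mem_append_left _ hB
            · refine List.mem_append_right _ ?_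
              rw [pv_mem_marks] at hB ⊢
              obtain ⟨s, hsS, hjs, k, hk, hts⟩ := hB
              exact ⟨s, hsS, by omega, k, hk, hts⟩
          · rw [if_neg hB, if_neg ?_]
            intro hC
            rcases List.mem_append.mp hC with hC | hC
            · exact hB (List.mem_append_left _ hC)
            · rw [pv_mem_marks] at hC
              obtain ⟨s, hsS, hjs, k, hk, hts⟩ := hC
              rcases lt_or_eq_of_le (by omega : (jn : Int) ≤ s) with hlt | heq
              · exact hB (List.mem_append_right _ ((pv_mem_marks _ _ _ _ _).mpr ⟨s, hsS, hlt, k, hk, hts⟩))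
              · exact hA ((pv_mem_mapRange _ _ _ _).mpr ⟨k, hk, by omega⟩)
      exact ih h2 (by omega) hlen2 hinv2
    · -- the cell is 0: nothing happens
      have hc : PySem.List.pyGetD h (jn : Int) 0 = 0 := by
        rw [hinvjn, if_neg ?_]
        intro hC
        rcases List.mem_append.mp hC with hC | hC
        · exact hmem hC
        · -- t = jn in marks at jn - 1 means some s > jn-1, s ∈ S; s = jn impossible (jn ∉ S), s > jn impossible
          rw [pv_mem_marks] at hC
          obtain ⟨s, hsS, hjs, k, hk, hts⟩ := hC
          rcases lt_or_eq_of_le (by omega : (jn : Int) ≤ s) with hlt | heq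
          · have : (jn : Int) < s + ((k : Int) + 1) * w := by nlinarith
            omega
          · exact hmem (heq ▸ hsS)
      rw [hc]
      have : ((0:Int) == 1) = false := by decide
      rw [this]
      simp only [Bool.false_eq_true, if_false]
      apply ih h (by omega) hlen
      intro t ht0 htL
      rw [hinv t ht0 htL]
      apply if_congr _ rfl rfl
      constructor
      · intro hC
        rcases List.mem_append.mp hC with hC | hC
        · exact List.mem_append_left _ hC
        · refine List.mem_append_right _ ?_
          rw [pv_mem_marks] at hC ⊢
          obtain ⟨s, hsS, hjs, k, hk, hts⟩ := hC
          exact ⟨s, hsS, by omega, k, hk, hts⟩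
      · intro hC
        rcases List.mem_append.mp hC with hC | hC
        · exact List.mem_append_left _ hC
        · refine List.mem_append_right _ ?_
          rw [pv_mem_marks] at hC ⊢
          obtain ⟨s, hsS, hjs, k, hk, hts⟩ := hC
          rcases lt_or_eq_of_le (by omega : (jn : Int) ≤ s) with hlt | heq
          · exact ⟨s, hsS, by omega, k, hk, hts⟩
          · exact absurd (heq ▸ hsS) hmem

def pvProdSum (ps : List (Int × Int)) : Int := (ps.map (fun p => p.1 * p.2)).sum

theorem pv_prodSum_nonneg (ps : List (Int × Int)) (hp : ∀ p ∈ ps, 0 ≤ p.1 ∧ 0 ≤ p.2) :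
    0 ≤ pvProdSum ps := by
  induction ps with
  | nil => simp [pvProdSum]
  | cons p ps ih =>
    have h1 := hp p (by simp)
    have h2 := ih (fun q hq => hp q (by simp [hq]))
    simp only [pvProdSum, List.map_cons, List.sum_cons] at *
    nlinarith [mul_nonneg h1.1 h1.2]

theorem pv_mainloop (max : Int) (L : Nat) (hL : (L : Int) = max + 1) :
    ∀ (ps : List (Int × Int)) (S : List Int) (h : List Int) (P : Int),
    (∀ p ∈ ps, 0 ≤ p.1 ∧ 0 ≤ p.2) → S.Nodup → (∀ s ∈ S, 0 ≤ s ∧ s ≤ P) → 0 ≤ P →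
    P + pvProdSum ps ≤ max → h.length = L →
    (∀ t : Int, 0 ≤ t → t < (L : Int) →
      PySem.List.pyGetD h t 0 = if t ∈ S then 1 else 0) →
    (let h' := ps.foldl (fun h p =>
        (PySem.List.pyRange max (-1) (-1)).foldl
          (fun h j => if PySem.List.pyGetD h j 0 == 1 then
            (PySem.List.pyRange 0 p.2 1).foldl
              (fun h k => PySem.List.pySetD h (j + (k + 1) * p.1) 1) h
          else h) h) h
     let S' := ps.foldl (fun S p => PySem.Set.ofList (S.flatMap (fun s =>
        (PySem.List.pyRange 0 (p.2 + 1) 1).map (fun k => s + k * p.1)))) S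
     h'.length = L ∧ S'.Nodup ∧ (∀ s ∈ S', 0 ≤ s ∧ s ≤ P + pvProdSum ps) ∧
       (∀ t : Int, 0 ≤ t → t < (L : Int) →
         PySem.List.pyGetD h' t 0 = if t ∈ S' then 1 else 0)) := by
  intro ps
  induction ps with
  | nil =>
    intro S h P hp hnd hSb hP hsum hlen hinv
    simpa [pvProdSum] using ⟨hlen, hnd, fun s hs => ⟨(hSb s hs).1, by simpa using (hSb s hs).2⟩, hinv⟩
  | cons p ps ih =>
    intro S h P hp hnd hSb hP hsum hlen hinv
    simp only [List.foldl_cons]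
    obtain ⟨hw, hn⟩ := hp p (by simp)
    set w := p.1
    set n := p.2.toNat with hn'
    have hp2 : p.2 = (n : Int) := by omega
    have hprodpos : 0 ≤ pvProdSum ps := pv_prodSum_nonneg ps (fun q hq => hp q (by simp [hq]))
    have hwn : 0 ≤ w * p.2 := mul_nonneg hw hn
    have hcons : pvProdSum (p :: ps) = w * p.2 + pvProdSum ps := by
      simp only [pvProdSum, List.map_cons, List.sum_cons]
      rfl
    -- the j-loop hypothesis
    have hS' : ∀ s ∈ S, 0 ≤ s ∧ s + (n : Int) * w < (L : Int) := by
      intro s hs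
      obtain ⟨h0s, hsP⟩ := hSb s hs
      refine ⟨h0s, ?_⟩
      have : (n : Int) * w = w * p.2 := by rw [hp2]; ring
      rw [hL, this]; omega
    -- initial marks are empty
    have hmarks0 : pvMarks S w n ((L : Int) - 1) = [] := by
      apply List.flatMap_eq_nil_iff.mpr
      intro s hs
      rw [List.mem_filter] at hs
      have := (hSb s hs.1).2
      have h2 := hs.2
      simp only [decide_eq_true_eq] at h2
      omega
    have hinv0 : ∀ t : Int, 0 ≤ t → t < (L : Int) →
        PySem.List.pyGetD h t 0 = if t ∈ S ++ pvMarks S w n (((L : Nat) : Int) - 1) then 1 else 0 := by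
      intro t ht0 htL
      rw [hmarks0, List.append_nil]
      exact hinv t ht0 htL
    simp only [hp2]
    have hjl := pv_jloop S w n L hw hS' L h le_rfl hlen hinv0
    rw [(by omega : ((L : Nat) : Int) - 1 = max)] at hjl
    obtain ⟨hlen1, hinv1⟩ := hjl
    set h1 := (PySem.List.pyRange max (-1) (-1)).foldl
        (fun h j => if PySem.List.pyGetD h j 0 == 1 then
          (PySem.List.pyRange 0 ((n : Nat) : Int) 1).foldl
            (fun h k => PySem.List.pySetD h (j + (k + 1) * w) 1) h
        else h) h with hh1
    set S1 := PySem.Set.ofList (S.flatMap (fun s =>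
        (PySem.List.pyRange 0 (((n : Nat) : Int) + 1) 1).map (fun k => s + k * w))) with hS1
    -- membership in the new set
    have hmem1 : ∀ t : Int, t ∈ S1 ↔ t ∈ S ++ pvMarks S w n (-1) := by
      intro t
      rw [hS1, PySem.Set.mem_ofList]
      simp only [List.mem_flatMap, List.mem_map, List.mem_append, PySem.List.mem_pyRange_one,
        pv_mem_marks]
      constructor
      · rintro ⟨s, hs, k, ⟨hk0, hk1⟩, he⟩
        rcases eq_or_lt_of_le hk0 with h0 | hpos
        · left; rw [← he, ← h0]; simpa using hs
        · right
          refine ⟨s, hs, by linarith [(hSb s hs).1], (k - 1).toNat, by omega, ?_⟩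
          rw [← he]
          have : ((k - 1).toNat : Int) = k - 1 := by omega
          rw [this]; ring
      · rintro (hts | ⟨s, hs, hs1, k, hk, he⟩)
        · exact ⟨t, hts, 0, ⟨le_rfl, by omega⟩, by ring⟩
        · refine ⟨s, hs, (k : Int) + 1, ⟨by positivity, by omega⟩, by rw [he]⟩
    have hnd1 : S1.Nodup := PySem.Set.nodup_ofList _
    have hSb1 : ∀ s ∈ S1, 0 ≤ s ∧ s ≤ P + w * p.2 := by
      intro t ht
      rcases List.mem_append.mp ((hmem1 t).mp ht) with hts | htm
      · obtain ⟨h1, h2⟩ := hSb t hts; exact ⟨h1, by omega⟩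
      · rw [pv_mem_marks] at htm
        obtain ⟨s, hs, _, k, hk, he⟩ := htm
        obtain ⟨hs0, hsP⟩ := hSb s hs
        have hkw : ((k : Int) + 1) * w ≤ (n : Int) * w := by
          apply mul_le_mul_of_nonneg_right _ hw; exact_mod_cast hk
        have : (n : Int) * w = w * p.2 := by rw [hp2]; ring
        constructor
        · rw [he]; positivity
        · rw [he]; omega
    have hinv1' : ∀ t : Int, 0 ≤ t → t < (L : Int) →
        PySem.List.pyGetD h1 t 0 = if t ∈ S1 then 1 else 0 := by
      intro t ht0 htL
      rw [hinv1 t ht0 htL]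
      exact if_congr (by rw [hmem1]) rfl rfl
    have := ih S1 h1 (P + w * p.2) (fun q hq => hp q (by simp [hq])) hnd1 hSb1
      (by positivity) (by rw [hcons] at hsum; omega) hlen1 hinv1'
    simp only at this ⊢
    rw [hcons]
    obtain ⟨c1, c2, c3, c4⟩ := this
    exact ⟨c1, c2, fun s hs => by have := c3 s hs; constructor <;> omega, c4⟩

theorem pv_countP_members (S : List Int) (L : Nat) (hnd : S.Nodup)
    (hb : ∀ s ∈ S, 0 ≤ s ∧ s < (L : Int)) :
    (PySem.List.pyRange 0 (L : Int) 1).countP (fun i => decide (i ∈ S)) = S.length := by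
  have hperm : ((PySem.List.pyRange 0 (L : Int) 1).filter (fun i => decide (i ∈ S))).Perm S := by
    apply (List.perm_ext_iff_of_nodup ((PySem.List.nodup_pyRange_one 0 (L : Int)).filter _) hnd).mpr
    intro a
    rw [List.mem_filter]
    simp only [decide_eq_true_eq, PySem.List.mem_pyRange_one]
    constructor
    · exact fun x => x.2
    · intro ha
      exact ⟨⟨(hb a ha).1, (hb a ha).2⟩, ha⟩
  rw [List.countP_eq_length_filter]
  simp [hperm.length_eq]

theorem pv_countloop (h : List Int) (S : List Int) (hnd : S.Nodup)
    (hb : ∀ s ∈ S, 0 ≤ s ∧ s < (h.length : Int))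
    (inv : ∀ t : Int, 0 ≤ t → t < (h.length : Int) →
      PySem.List.pyGetD h t 0 = if t ∈ S then 1 else 0) :
    (PySem.List.pyRange 0 h.length 1).foldl
      (fun c i => if PySem.List.pyGetD h i 0 == 1 then c + 1 else c) 0 = (S.length : Int) := by
  rw [PySem.List.foldl_count_if (fun i => PySem.List.pyGetD h i 0 == 1) (PySem.List.pyRange 0 h.length 1) 0]
  rw [List.countP_congr (q := fun i => decide (i ∈ S)) ?_]
  · rw [pv_countP_members S h.length hnd hb]
    norm_num
  · intro i hi
    rw [PySem.List.mem_pyRange_one] at hi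
    rw [inv i hi.1 hi.2]
    by_cases hm : i ∈ S <;> simp [hm]

theorem pv_zip_nonneg (ws ns : List Int) (hw : ∀ w ∈ ws, 0 ≤ w)
    (hn : ∀ n ∈ ns.take ws.length, 0 ≤ n) :
    ∀ p ∈ ws.zip ns, 0 ≤ p.1 ∧ 0 ≤ p.2 := by
  intro p hp
  obtain ⟨i, hi, he⟩ := List.mem_iff_getElem.mp hp
  rw [List.getElem_zip] at he
  have hiw : i < ws.length := by simp [List.length_zip] at hi; omega
  have hin : i < ns.length := by simp [List.length_zip] at hi; omega
  constructor
  · rw [← he]; exact hw _ (List.getElem_mem _)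
  · rw [← he]
    apply hn
    exact List.mem_iff_getElem.mpr ⟨i, by simp [List.length_take]; omega, by rw [List.getElem_take]⟩

theorem pv_h0 (max : Int) :
    (PySem.List.pySetD ((PySem.List.pyRange 0 (max + 1) 1).map (fun _ => (0:Int))) 0 1).length
      = (max + 1).toNat ∧
    ∀ t : Int, 0 ≤ t → t < (((max + 1).toNat : Nat) : Int) →
      PySem.List.pyGetD
        (PySem.List.pySetD ((PySem.List.pyRange 0 (max + 1) 1).map (fun _ => (0:Int))) 0 1) t 0
      = if t ∈ PySem.Set.ofList [(0:Int)] then 1 else 0 := by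
  have hblen : ((PySem.List.pyRange 0 (max + 1) 1).map (fun _ => (0:Int))).length = (max + 1).toNat := by
    rw [List.length_map, PySem.List.length_pyRange_one]; norm_num
  have hset : PySem.List.pySetD ((PySem.List.pyRange 0 (max + 1) 1).map (fun _ => (0:Int))) 0 1
      = ((PySem.List.pyRange 0 (max + 1) 1).map (fun _ => (0:Int))).set 0 1 := by
    rw [PySem.List.pySetD_of_nonneg _ _ le_rfl]; norm_num
  rw [hset]
  constructor
  · rw [List.length_set, hblen]
  · intro t ht0 htL
    rw [PySem.List.pyGetD_of_nonneg _ _ ht0]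
    have htl : t.toNat < (((PySem.List.pyRange 0 (max + 1) 1).map (fun _ => (0:Int))).set 0 1).length := by
      rw [List.length_set, hblen]; omega
    rw [List.getD_eq_getElem _ _ htl]
    have hmem : (t ∈ PySem.Set.ofList [(0:Int)]) ↔ t = 0 := by
      rw [PySem.Set.mem_ofList]; simp
    by_cases h0 : t = 0
    · subst h0
      rw [if_pos (hmem.mpr rfl)]
      simp
    · rw [if_neg (fun hc => h0 (hmem.mp hc))]
      have : t.toNat ≠ 0 := by omega
      rw [List.getElem_set_ne (by omega)]
      simp


theorem pv_intfold {β : Type} (c : Nat) (l : List β) : ∀ m : Nat,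
    l.foldl (fun (a : Int) _ => PySem.Int.bor a (a <<< ((c : Nat) : Int))) (m : Int)
      = ((l.foldl (fun (a : Nat) _ => a ||| (a <<< c)) m : Nat) : Int) := by
  induction l with
  | nil => intro m; rfl
  | cons x l ih =>
    intro m
    simp only [List.foldl_cons]
    rw [Int.shiftLeft_natCast, PySem.Int.bor_natCast, ih]

theorem pv_testBit_one (t : Nat) : (1 : Nat).testBit t = decide (t = 0) := by
  cases t with
  | zero => simp
  | succ t => simp [Nat.testBit_succ, Nat.zero_testBit]

theorem pv_mask_inner (w : Int) (hw : 0 ≤ w) (n : Nat) (m : Nat) (S : List Int)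
    (hS : ∀ s ∈ S, 0 ≤ s)
    (hinv : ∀ t : Nat, m.testBit t ↔ ((t : Int) ∈ S)) :
    ∀ t : Nat, ((List.range n).foldl (fun m _ => m ||| (m <<< w.toNat)) m).testBit t ↔
      ∃ s ∈ S, ∃ k : Nat, k ≤ n ∧ (t : Int) = s + (k : Int) * w := by
  induction n with
  | zero =>
    intro t
    simp only [List.range_zero, List.foldl_nil]
    rw [hinv t]
    constructor
    · intro ht; exact ⟨t, ht, 0, le_rfl, by push_cast; ring⟩
    · rintro ⟨s, hs, k, hk, he⟩
      have : (k : Nat) = 0 := by omega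
      subst this
      simp at he
      rwa [he]
  | succ n ih =>
    intro t
    rw [List.range_succ, List.foldl_append, List.foldl_cons, List.foldl_nil,
      Nat.testBit_or, Nat.testBit_shiftLeft]
    constructor
    · intro hor
      rcases Bool.or_eq_true_iff.mp hor with hb | hb
      · obtain ⟨s, hs, k, hk, he⟩ := (ih t).mp hb
        exact ⟨s, hs, k, by omega, he⟩
      · rw [Bool.and_eq_true] at hb
        obtain ⟨hge, hb⟩ := hb
        have hge' : w.toNat ≤ t := by simpa using hge
        obtain ⟨s, hs, k, hk, he⟩ := (ih (t - w.toNat)).mp hb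
        refine ⟨s, hs, k + 1, by omega, ?_⟩
        have h1 : ((t - w.toNat : Nat) : Int) = (t : Int) - w := by omega
        rw [h1] at he
        push_cast
        linarith [he]
    · rintro ⟨s, hs, k, hk, he⟩
      rcases Nat.lt_succ_iff_lt_or_eq.mp (Nat.lt_succ_of_le hk) with hk' | hk'
      · exact Bool.or_eq_true_iff.mpr (Or.inl ((ih t).mpr ⟨s, hs, k, by omega, he⟩))
      · subst hk'
        refine Bool.or_eq_true_iff.mpr (Or.inr ?_)
        rw [Bool.and_eq_true]
        have hs0 := hS s hs
        have hsplit : ((n : Int) + 1) * w = (n : Int) * w + w := by ring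
        have hnw : 0 ≤ (n : Int) * w := by positivity
        push_cast at he
        have hwt : w.toNat ≤ t := by omega
        constructor
        · simpa using hwt
        · apply (ih (t - w.toNat)).mpr
          refine ⟨s, hs, n, le_rfl, ?_⟩
          have h1 : ((t - w.toNat : Nat) : Int) = (t : Int) - w := by omega
          rw [h1]
          omega

theorem pv_mask_pairs : ∀ (ps : List (Int × Int)) (S : List Int) (m : Nat),
    (∀ p ∈ ps, 0 ≤ p.1 ∧ 0 ≤ p.2) → (∀ s ∈ S, 0 ≤ s) →
    (∀ t : Nat, m.testBit t ↔ (t : Int) ∈ S) →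
    ∃ M : Nat,
      ps.foldl (fun mask p => (PySem.List.pyRange 0 p.2 1).foldl
          (fun mask _ => PySem.Int.bor mask (mask <<< p.1.toNat)) mask) (m : Int) = (M : Int) ∧
      (∀ t : Nat, M.testBit t ↔ (t : Int) ∈
        ps.foldl (fun S p => PySem.Set.ofList (S.flatMap (fun s =>
          (PySem.List.pyRange 0 (p.2 + 1) 1).map (fun k => s + k * p.1)))) S) := by
  intro ps
  induction ps with
  | nil => intro S m _ _ hinv; exact ⟨m, rfl, hinv⟩
  | cons p ps ih =>
    intro S m hp hS hinv
    obtain ⟨hw, hn⟩ := hp p (by simp)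
    set n := p.2.toNat with hndef
    have hp2 : p.2 = (n : Int) := by omega
    simp only [List.foldl_cons, hp2, PySem.List.pyRange_zero_nat, List.foldl_map]
    set m1 := (List.range n).foldl (fun (a : Nat) _ => a ||| (a <<< p.1.toNat)) m with hm1
    have hfold1 := pv_intfold p.1.toNat (List.range n) m
    have hbits1 := pv_mask_inner p.1 hw n m S hS hinv
    set S1 := PySem.Set.ofList (S.flatMap (fun s =>
        (PySem.List.pyRange 0 ((n : Int) + 1) 1).map (fun k => s + k * p.1))) with hS1
    have hmem1 : ∀ t : Int, t ∈ S1 ↔ ∃ s ∈ S, ∃ k : Nat, k ≤ n ∧ t = s + (k : Int) * p.1 := by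
      intro t
      rw [hS1, PySem.Set.mem_ofList]
      simp only [List.mem_flatMap, List.mem_map, PySem.List.mem_pyRange_one]
      constructor
      · rintro ⟨s, hs, k, ⟨hk0, hk1⟩, he⟩
        refine ⟨s, hs, k.toNat, by omega, ?_⟩
        rw [← he]
        have : ((k.toNat : Nat) : Int) = k := by omega
        rw [this]
      · rintro ⟨s, hs, k, hk, he⟩
        exact ⟨s, hs, (k : Int), ⟨by positivity, by omega⟩, he.symm⟩
    have hS1pos : ∀ s ∈ S1, 0 ≤ s := by
      intro s hs
      obtain ⟨s0, hs0, k, hk, he⟩ := (hmem1 s).mp hs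
      have := hS s0 hs0
      rw [he]; positivity
    have hinv1 : ∀ t : Nat, m1.testBit t ↔ (t : Int) ∈ S1 := by
      intro t
      rw [hbits1 t, hmem1]
    obtain ⟨M, hfoldM, hbitsM⟩ := ih S1 m1 (fun q hq => hp q (by simp [hq])) hS1pos hinv1
    refine ⟨M, ?_, ?_⟩
    · rw [hfold1, hfoldM]
    · exact hbitsM

theorem pv_bitCount_countP : ∀ (L : Nat) (M : Nat), (∀ t, M.testBit t = true → t < L) →
    PySem.Int.bitCount (M : Int) = (List.range L).countP (fun t => M.testBit t) := by
  intro L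
  induction L with
  | zero =>
    intro M h
    have hM : M = 0 := by
      apply Nat.eq_of_testBit_eq
      intro i
      rw [Nat.zero_testBit]
      cases hb : M.testBit i with
      | false => rfl
      | true => exact absurd (h i hb) (by omega)
    subst hM
    simp [PySem.Int.bitCount_zero]
  | succ L ih =>
    intro M h
    by_cases hM0 : M = 0
    · subst hM0
      simp [PySem.Int.bitCount_zero, Nat.zero_testBit]
    · have hMpos : 0 < M := Nat.pos_of_ne_zero hM0
      rw [PySem.Int.bitCount_natCast hMpos]
      have hhalf : ∀ t, (M / 2).testBit t = true → t < L := by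
        intro t ht
        rw [← Nat.testBit_succ] at ht
        have := h (t + 1) ht
        omega
      rw [ih (M / 2) hhalf, List.range_succ_eq_map, List.countP_cons, List.countP_map]
      have hc : (List.range L).countP ((fun t => M.testBit t) ∘ Nat.succ)
          = (List.range L).countP (fun t => (M / 2).testBit t) := by
        apply List.countP_congr
        intro t _
        simp [Function.comp, Nat.testBit_succ]
      rw [hc, Nat.testBit_zero]
      rcases Nat.mod_two_eq_zero_or_one M with hm | hm
      · simp [hm]
      · simp [hm]
        omega

theorem pv_bits_count (M : Nat) (S : List Int) (L : Nat) (hnd : S.Nodup)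
    (hb : ∀ s ∈ S, 0 ≤ s ∧ s < (L : Int)) (hbits : ∀ t : Nat, M.testBit t ↔ (t : Int) ∈ S) :
    PySem.Int.bitCount (M : Int) = S.length := by
  have hlt : ∀ t, M.testBit t = true → t < L := by
    intro t ht
    have := (hb _ ((hbits t).mp ht)).2
    omega
  rw [pv_bitCount_countP L M hlt]
  have h1 : (List.range L).countP (fun t => M.testBit t)
      = (PySem.List.pyRange 0 (L : Int) 1).countP (fun i => decide (i ∈ S)) := by
    rw [PySem.List.pyRange_zero_nat, List.countP_map]
    apply List.countP_congr
    intro t _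
    simp only [Function.comp]
    by_cases hm : (t : Int) ∈ S
    · simp [hm, (hbits t).mpr hm]
    · have hf : M.testBit t = false := by
        cases hbt : M.testBit t
        · rfl
        · exact absurd ((hbits t).mp hbt) hm
      simp [hm, hf]
  rw [h1, pv_countP_members S L hnd hb]

-- ===== VERDICT (by name: the statement is the Claim_ definition above) =====
theorem combination_weight_nums_spec : Claim_equal_combination_weight_nums := by
  unfold Claim_equal_combination_weight_nums
  intro ws ns _ hpre
  obtain ⟨hlen, hw, hn⟩ := hpre
  unfold Spec_combination_weight_nums combination_weight_nums combination_weight_nums_alt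
  have hpairs := pv_zip_nonneg ws ns hw hn
  dsimp only
  rw [pv_foldl_idx_zip (fun a x y => a + x * y) ws ns 0 hlen]
  rw [pv_foldl_idx_zip (fun (a : List Int) x y =>
        (PySem.List.pyRange ((ws.zip ns).foldl (fun a p => a + p.1 * p.2) 0) (-1) (-1)).foldl
          (fun h j => if PySem.List.pyGetD h j 0 == 1 then
            (PySem.List.pyRange 0 y 1).foldl
              (fun h k => PySem.List.pySetD h (j + (k + 1) * x) 1) h
          else h) a) ws ns _ hlen]
  have hmaxps : (ws.zip ns).foldl (fun a p => a + p.1 * p.2) 0 = pvProdSum (ws.zip ns) := by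
    rw [PySem.List.foldl_add (ws.zip ns) (fun p => p.1 * p.2) 0, zero_add]; rfl
  have hmax0 : 0 ≤ (ws.zip ns).foldl (fun a p => a + p.1 * p.2) 0 := by
    rw [hmaxps]; exact pv_prodSum_nonneg _ hpairs
  set max := (ws.zip ns).foldl (fun a p => a + p.1 * p.2) 0 with hmaxdef
  set L := (max + 1).toNat with hLdef
  have hL : (L : Int) = max + 1 := by omega
  obtain ⟨h0len, h0inv⟩ := pv_h0 max
  have hb0 : ∀ s ∈ PySem.Set.ofList [(0:Int)], 0 ≤ s ∧ s ≤ (0:Int) := by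
    intro s hs
    rw [PySem.Set.mem_ofList] at hs
    simp at hs
    omega
  have hml := pv_mainloop max L hL (ws.zip ns) (PySem.Set.ofList [(0:Int)])
    (PySem.List.pySetD ((PySem.List.pyRange 0 (max + 1) 1).map (fun _ => (0:Int))) 0 1) 0
    hpairs (PySem.Set.nodup_ofList _) hb0 le_rfl (by rw [← hmaxps]; omega)
    (by rw [h0len]) h0inv
  dsimp only at hml
  obtain ⟨c1, c2, c3, c4⟩ := hml
  rw [pv_countloop _ _ c2 ?hb ?hinv]
  case hb =>
    intro s hs
    obtain ⟨d1, d2⟩ := c3 s hs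
    rw [c1]
    constructor
    · exact d1
    · rw [← hmaxps] at d2; omega
  case hinv =>
    intro t ht0 htL
    rw [c1] at htL
    exact c4 t ht0 htL
  -- B side: the bitset holds exactly the final set
  have hinit : ∀ t : Nat, (1 : Nat).testBit t ↔ ((t : Int) ∈ PySem.Set.ofList [(0:Int)]) := by
    intro t
    rw [pv_testBit_one, PySem.Set.mem_ofList]
    simp
  have hS0pos : ∀ s ∈ PySem.Set.ofList [(0:Int)], 0 ≤ s := fun s hs => (hb0 s hs).1
  obtain ⟨M, hfoldM, hbitsM⟩ := pv_mask_pairs (ws.zip ns) (PySem.Set.ofList [(0:Int)]) 1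
    hpairs hS0pos hinit
  rw [Nat.cast_one] at hfoldM
  rw [hfoldM]
  rw [pv_bits_count M _ L c2 ?_ hbitsM]
  intro s hs
  obtain ⟨d1, d2⟩ := c3 s hs
  constructor
  · exact d1
  · rw [← hmaxps] at d2; omega
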